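/-
  `Bits` AND μ AT WORK (Vorbis/Bits.lean): each structure used the way a function proof uses it.
      (a) check sites: get8's load of the input byte; next_segment's `segments[next_seg]`; a constant-offset field; getn's ranges
      (b) frame: a store to `eof`, a spill to the stack, a callee's footprint, an allocator call (`ObjSame`), the struct copy
          `*f = p` (`Copied`, a `Move`), another block predicate; the input stays read-only
      (c) the writers: get8's `stream + 1`, skip's clamped step, next_segment's two stores — `Bits` again, and what μ does
      (d) μ: Lemma μ's cases from the pure lemmas; the composition of D-11
      (e) get_bits: the extraction's bound, the recursive arm
-/
import Vorbis.Bits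
namespace Vorbis.BitsTest
open X86 X86.User Asan Vorbis

/-! ### (a) Check sites -/

/-- THE PATTERN, in three lines: get8, `call __asan_load1_noabort` with `rdi = rbp` = the OLD stream pointer, after
`cmp rbp, [rbx+0x40]; jb` was taken. -/
example (Blk : Block → Prop) (Live : Nat → Prop) (len : Nat) (mem : Mem) (f : Nat) (h : Bits Blk len mem f)
    (hL : BlkLive Blk Live) (hc : Covers Live mem) (hjb : stb_vorbis.stream mem f < stb_vorbis.stream_end mem f) :
    AccessibleSmall mem (stb_vorbis.stream mem f) 1 := by
  have s := h.site_stream_byte hL hjb rfl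
  exact s.acc hc

/-- The same check in the register form: the register holds `addr (stream)`, the check is about its value. -/
example (Blk : Block → Prop) (Live : Nat → Prop) (len : Nat) (mem : Mem) (f : Nat) (h : Bits Blk len mem f)
    (hL : BlkLive Blk Live) (hc : Covers Live mem) (hjb : stb_vorbis.stream mem f < stb_vorbis.stream_end mem f) :
    AccessibleSmall mem (addr (stb_vorbis.stream mem f)).toNat 1 := by
  have s := h.site_stream_byte hL hjb rfl
  exact s.acc_addr hc

/-- next_segment, `lea rdi, [rbx + rbp*1 + 0x5d4]` with `rbx = addr f`, `rbp = word (next_seg)` (a `movsxd`), reached with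
`next_seg ≠ −1`: the address the stepper leaves is `f + next_seg.toNat + 1492`; `ha` turns it into the accessor form. -/
example (Blk : Block → Prop) (Live : Nat → Prop) (len : Nat) (mem : Mem) (f : Nat) (h : Bits Blk len mem f)
    (hL : BlkLive Blk Live) (hc : Covers Live mem) (hne : stb_vorbis.next_seg mem f ≠ -1) :
    addr f + word (stb_vorbis.next_seg mem f) + 1492 = addr (f + (stb_vorbis.next_seg mem f).toNat + 1492) ∧
      AccessibleSmall mem (f + (stb_vorbis.next_seg mem f).toNat + 1492) 1 := by
  have hi := h.next_seg_index hne
  constructor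
  · rw [word_nonneg _ hi.1]
    simp only [vfield]
  · have s := h.site_segment_next hL hne (a := f + (stb_vorbis.next_seg mem f).toNat + 1492) (by simp only [voff]; omega)
    exact s.acc hc

/-- The loops over `segments[i]`: ONE lemma for both spellings of the address, `[rbx + 0x5d4 + i]` and `[rbx + rbp*1 + 0x5d4]`. -/
example (Blk : Block → Prop) (Live : Nat → Prop) (len : Nat) (mem : Mem) (f i : Nat) (h : Bits Blk len mem f)
    (hL : BlkLive Blk Live) (hc : Covers Live mem) (hi : i < 255) :
    AccessibleSmall mem (f + 1492 + i) 1 ∧ AccessibleSmall mem (f + i + 1492) 1 := by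
  constructor
  · have s := h.site_segment hL i hi (a := f + 1492 + i) (by simp only [voff])
    exact s.acc hc
  · have s := h.site_segment hL i hi (a := f + i + 1492) (by simp only [voff]; omega)
    exact s.acc hc

/-- A constant-offset field: `__asan_load4_noabort(&f->valid_bits)` (`lea rdi, [rdi + 0x6e8]`), and the load that follows. -/
example (L : Layout) (Blk : Block → Prop) (Live : Nat → Prop) (len : Nat) (mem : Mem) (f : Nat) (h : Bits Blk len mem f)
    (hL : BlkLive Blk Live) (hc : Covers Live mem) (hLay : 0xC00000 ≤ L.hi) :
    AccessibleSmall mem (f + 1768) 4 ∧ L.Has (addr (f + 1768)) 4 := by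
  have s := h.site_field hL 1768 4 (by omega) (by omega) rfl
  exact ⟨s.acc hc, s.has hc hLay⟩

/-- getn(f, f->segments, segment_count): after the length test, memcpy's source lies in the input, its destination in
`segments[255]`, and the two do not meet. -/
example (Blk : Block → Prop) (len : Nat) (mem : Mem) (f n : Nat) (h : Bits Blk len mem f)
    (hn : (n : Int) = stb_vorbis.segment_count mem f)
    (htest : (n : Int) ≤ (stb_vorbis.stream_end mem f : Int) - (stb_vorbis.stream mem f : Int)) :
    (inBlock len).contains (stb_vorbis.stream mem f) n ∧ (objBlock f).contains (f + Off.stb_vorbis.segments) n ∧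
      (inBlock len).disjoint (objBlock f) := by
  have hN1 := h.N1
  have hfit := getn_fits (stb_vorbis.stream_end mem f) (stb_vorbis.stream mem f) n (by omega) htest
  refine ⟨?_, ?_, h.obj_disjoint_in⟩
  · exact h.stream_contains n (by omega)
  · exact (Bits.segments_contains f n (by omega)).1

/-- … and memcpy's two range checks (`n ≥ 1`). -/
example (Blk : Block → Prop) (Live : Nat → Prop) (len : Nat) (mem : Mem) (f n : Nat) (h : Bits Blk len mem f)
    (hL : BlkLive Blk Live) (hc : Covers Live mem) (h1 : 1 ≤ n) (h255 : n ≤ 255)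
    (hfit : stb_vorbis.stream mem f + n ≤ stb_vorbis.stream_end mem f) :
    Accessible mem (stb_vorbis.stream mem f) n ∧ Accessible mem (f + Off.stb_vorbis.segments) n := by
  have s1 := h.site_stream_range hL n hfit h1 rfl
  have s2 := h.site_segments_range hL n h255 h1 rfl
  exact ⟨s1.acc_range hc, s2.acc_range hc⟩

/-! ### (b) Frame -/

/-- get8's `mov DWORD PTR [rbx + 0x88], 1` (`f->eof = 1`): a store inside `*f` that `Bits` does not read. -/
example (Blk : Block → Prop) (len : Nat) (mem : Mem) (f : Nat) (h : Bits Blk len mem f) :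
    Bits Blk len (mem.writeLE (addr f + 136) 4 1) f := by
  simp only [vfield]
  exact h.store_other 136 4 1 (by omega) (by omega) (by omega) (by omega) (by omega)

/-- … and it leaves μ and the input alone. -/
example (Blk : Block → Prop) (len : Nat) (mem : Mem) (f : Nat) (h : Bits Blk len mem f) :
    mu (mem.writeLE (addr (f + 136)) 4 1) f = mu mem f ∧ (inBlock len).Same mem (mem.writeLE (addr (f + 136)) 4 1) := by
  constructor
  · exact h.mu_store_other 136 4 1 (by omega) (by omega) (by omega) (by omega) (by omega) (by omega)
  · apply h.input_same_of_store_obj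
    show f ≤ f + 136 ∧ f + 136 + 4 ≤ f + Off.sizeof.stb_vorbis
    simp only [voff]
    omega

/-- A spill `mov [rsp + 8], eax` while `*f` is the arena copy (the stack is below the arena). -/
example (Blk : Block → Prop) (len : Nat) (mem : Mem) (f : Nat) (sp : Word) (v : Nat) (h : Bits Blk len mem f)
    (hsp : sp.toNat + 12 ≤ f) : Bits Blk len (mem.writeLE (sp + 8) 4 v) f := by
  have hr := h.OBR
  have e : (sp + 8).toNat = sp.toNat + 8 := toNat_add_ofNat sp 8 (by omega)
  apply h.frame_fields
  exact Bits.SameFields.of_writeLE_word mem f (sp + 8) 4 v (by omega) (by omega) (by omega) (by omega) (by omega)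

/-- A callee whose footprint is one window below `*f` (a check routine's stack use, memset of an arena block below …):
`Bits` and μ are kept. `transfer` FROM AN `ObjSame` (that is `Bits.frame`), and μ through the same `ObjSame`. -/
example (Blk : Block → Prop) (len : Nat) (mem mem' : Mem) (f lo hi : Nat) (h : Bits Blk len mem f)
    (hs : Mem.SameExcept [⟨lo, hi⟩] mem mem') (hd : hi ≤ f) : Bits Blk len mem' f ∧ mu mem' f = mu mem f := by
  have hr := h.OBR
  have hsame : ObjSame f mem mem' := by
    apply ObjSame.of_sameExcept hs (by omega)
    intro w hw
    have e : w = ⟨lo, hi⟩ := List.mem_singleton.mp hw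
    subst e
    exact Or.inl hd
  exact ⟨h.frame hsame, mu_transfer (hsame.sub (by decide))⟩

/-- An allocator call (`setup_malloc` moved `setup_offset`: everything else of `*f` is the same): `transfer` with the
`ObjSame` spelled out — the windows by `.sub (by decide)`, the ghost facts of the target from `h` itself. -/
example (Blk : Block → Prop) (len : Nat) (mem mem' : Mem) (f : Nat) (h : Bits Blk len mem f) (hs : ObjSame f mem mem') :
    Bits Blk len mem' f :=
  h.transfer (hs.sub (by decide)) ⟨h.OB1, h.OB1a⟩ h.OBR h.S2

/-- The struct copy `*f = p` of stb_vorbis_open_memory: `transfer` FROM A `Copied`. `Blk'` is the block predicate after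
`vorbis_alloc`: the new arena block and the input are allocated in it. -/
example (Blk Blk' : Block → Prop) (len : Nat) (mem mem' : Mem) (p f : Nat) (h : Bits Blk len mem p)
    (hcp : Copied mem p mem' f 1808) (hob : OB1 Blk' f) (hr : 0x400000 ≤ f ∧ f + Off.sizeof.stb_vorbis ≤ 0xC00000)
    (hin : Blk' (inBlock len)) : Bits Blk' len mem' f ∧ mu mem' f = mu mem p :=
  ⟨h.transfer (ObjEq.of_copied hcp (by decide)) hob hr hin, mu_transfer (ObjEq.of_copied hcp (by decide))⟩

/-- The same from the bundled hypotheses of the transport, a `Move` (this is `Group.Moves` for `Bits`). -/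
example (Blk Blk' : Block → Prop) (len : Nat) (mem mem' : Mem) (p f : Nat) (h : Bits Blk len mem p)
    (hm : Move Blk Blk' mem mem' p f) : Bits Blk' len mem' f :=
  h.transfer (hm.objEq (by decide)) hm.ob1 hm.range (hm.sub _ h.S2)

/-- Another block predicate (a frame was pushed: more blocks are allocated). -/
example (Blk Blk' : Block → Prop) (len : Nat) (mem : Mem) (f : Nat) (h : Bits Blk len mem f)
    (hB : ∀ B, Blk B → Blk' B) : Bits Blk' len mem f :=
  h.reblk (hB _ h.OB1) (hB _ h.S2)

/-- A store into a block above the input (stack, arena, output) keeps the input: S2's "never written". -/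
example (len : Nat) (mem : Mem) (C : Block) (b v : Nat) (hlen : len ≤ IN_MAX) (hC : 0x400000 ≤ C.base)
    (hCt : C.base + C.size ≤ 0xC00000) (hb : C.contains b 4) : (inBlock len).Same mem (mem.writeLE (addr b) 4 v) := by
  apply Block.Same.of_writeLE mem b 4 v _ hb (by omega)
  show IN + len ≤ C.base ∨ C.base + C.size ≤ IN
  simp only [voff] at hlen ⊢
  omega

/-! ### (c) The writers of `stream`, `next_seg`, `bytes_in_seg` -/

/-- get8's taken arm: `lea rax, [rbp + 1]; mov [rbx + 0x30], rax`. `Bits` holds again and μ dropped by `2^16`. -/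
example (Blk : Block → Prop) (len : Nat) (mem : Mem) (f : Nat) (h : Bits Blk len mem f)
    (hjb : stb_vorbis.stream mem f < stb_vorbis.stream_end mem f) :
    Bits Blk len (mem.writeLE (addr (f + 48)) 8 (stb_vorbis.stream mem f + 1)) f ∧
      mu (mem.writeLE (addr (f + 48)) 8 (stb_vorbis.stream mem f + 1)) f + 65536 ≤ mu mem f := by
  have hp := h.ptr_range
  constructor
  · exact (h.store_stream _ (by omega) (by omega)).1
  · rw [h.mu_store_stream _ (by omega), mu_def]
    have hc := muOf_consumed (stb_vorbis.stream_end mem f) (stb_vorbis.stream mem f) (stb_vorbis.stream mem f + 1) 1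
      (stb_vorbis.segment_count mem f) (stb_vorbis.next_seg mem f) (stb_vorbis.bytes_in_seg mem f) (by omega) (by omega)
    omega

/-- skip(f, n): the clamped step (FIX 20) keeps S3, so `Bits`. (μ: `Bits.mu_store_stream` + `muOf_le_of_stream`.) -/
example (Blk : Block → Prop) (len : Nat) (mem : Mem) (f : Nat) (n : Int) (h : Bits Blk len mem f) :
    Bits Blk len (mem.writeLE (addr (f + 48)) 8
      (stb_vorbis.stream mem f + skipLen n (stb_vorbis.stream_end mem f) (stb_vorbis.stream mem f))) f := by
  have hp := h.ptr_range
  have hfit := skipLen_fits n (stb_vorbis.stream_end mem f) (stb_vorbis.stream mem f) (by omega)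
  exact (h.store_stream _ (by omega) hfit).1

/-- next_segment's segment read, `next_seg ≠ −1`: the store of the new `next_seg` (here in one step: the value
`nextSeg next_seg segment_count`), then of `bytes_in_seg = len`. `Bits` holds again and μ is STRICTLY smaller (Lemma μ, b). -/
example (Blk : Block → Prop) (len : Nat) (mem : Mem) (f : Nat) (x : BitVec 32) (l : Nat) (h : Bits Blk len mem f)
    (hne : stb_vorbis.next_seg mem f ≠ -1) (hl : l < 256)
    (hx : x.toInt = nextSeg (stb_vorbis.next_seg mem f) (stb_vorbis.segment_count mem f)) :
    Bits Blk len ((mem.writeLE (addr (f + 1752)) 4 x.toNat).writeLE (addr (f + 1748)) 1 l) f ∧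
      mu ((mem.writeLE (addr (f + 1752)) 4 x.toNat).writeLE (addr (f + 1748)) 1 l) f < mu mem f := by
  have hN2' := nextSeg_N2 _ _ h.N2 hne
  rw [← hx] at hN2'
  have h1 := h.store_next_seg x hN2'
  have hmu1 := h.mu_store_next_seg x
  constructor
  · exact h1.1.store_other 1748 1 l (by omega) (by omega) (by omega) (by omega) (by omega)
  · rw [h1.1.mu_store_bytes_in_seg l hl]
    -- the fields of the intermediate memory, in terms of the entry memory
    have ho := h.fields_store 1752 4 x.toNat (by omega)
    rw [ho.stream_end (by omega), ho.stream (by omega), ho.segment_count (by omega), h1.2, hx, mu_def]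
    exact muOf_next_segment _ _ _ _ _ _ l hne (by omega) (Nat.le_refl _)

/-! ### (d) μ -/

/-- Lemma μ, case a: get8_packet_raw with `bytes_in_seg ≥ 1` (`B − 1`; `stream` stays or advances). -/
example (e s s' : Nat) (sc ns : Int) (b : Nat) (hb : 1 ≤ b) (hs : s ≤ s') : muOf e s' sc ns (b - 1) < muOf e s sc ns b :=
  muOf_dec_byte e s s' sc ns b hb hs

/-- D-11, the composition: start_page = capture_pattern (4 real bytes: `s + 4 ≤ s1`) then start_page_no_capturepattern (its
BOUND, from `s1` to `s2`, the new page's `K′ ≤ 255`): strictly smaller, although the second step alone may increase μ. -/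
example (e s s1 s2 : Nat) (sc ns sc' ns' : Int) (b : Nat) (hcap : s + 4 ≤ s1) (hs : s1 ≤ s2) (he : s2 ≤ e)
    (hN1 : sc' ≤ 255) (hN2 : ns' = -1 ∨ ns' = 0 ∨ (1 ≤ ns' ∧ ns' < sc')) :
    muOf e s2 sc' ns' b < muOf e s sc ns b := by
  have hcapture := muOf_consumed e s s1 4 sc ns b hcap (by omega)
  have hbound := muOf_spnc_bound e s1 s2 sc ns sc' ns' b hs he (muK_le_255 ns' sc' hN1 hN2)
  omega

/-- The same in one step. -/
example (e s s2 : Nat) (sc ns sc' ns' : Int) (b : Nat) (hcap : s + 4 ≤ s2) (he : s2 ≤ e)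
    (hN1 : sc' ≤ 255) (hN2 : ns' = -1 ∨ ns' = 0 ∨ (1 ≤ ns' ∧ ns' < sc')) (hb : b ≤ 255) :
    muOf e s2 sc' ns' b < muOf e s sc ns b :=
  muOf_after_capture e s s2 sc ns sc' ns' b b hcap he (muK_le_255 ns' sc' hN1 hN2) hb

/-- A loop on μ (flush_packet, vorbis_decode_initial's retry loop): induction over the well-founded relation. -/
example (f : Nat) (P : Mem → Prop) (step : ∀ mem, (∀ mem', mu mem' f < mu mem f → P mem') → P mem) (mem : Mem) : P mem :=
  (mu_wf f).induction mem step

/-! ### (e) get_bits -/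

/-- The extraction `mov eax, 1; shl eax, cl; sub eax, 1; and eax, edx` with `cl = n ≤ 31` (the stepper shifts by
`n % 32`): the result is below `2^n`. -/
example (acc : BitVec 32) (n : Nat) (hn : n ≤ 31) : (((1#32 <<< (n % 32)) - 1#32) &&& acc).toNat < 2 ^ n := by
  have e : n % 32 = n := Nat.mod_eq_of_lt (by omega)
  rw [e]
  exact mask_and_lt acc n (by omega)

/-- The recursive arm for `n = 32` (`get_bits(f, 32)`: codebook `minimum_value` / `delta_value`): any u32; for `n = 27`:
below `2^27`. -/
example (z1 z2 : Nat) (h1 : GetBitsResult 24 z1) (h2 : GetBitsResult (27 - 24) z2) :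
    (z1 + z2 * 2 ^ 24) % 2 ^ 32 < 2 ^ 27 :=
  (GetBitsResult.combine 27 z1 z2 (by omega) h1 h2).2 (by omega)

/-- Stage 2 of get_bits' proof: both recursive calls satisfy the stage-1 contract; the arm's post follows. -/
example (Blk : Block → Prop) (len : Nat) (mem mem1 mem2 : Mem) (f z1 z2 : Nat)
    (hvb : 0 ≤ stb_vorbis.valid_bits mem f)
    (c1 : GetBitsPost Blk len mem mem1 f 24 z1) (c2 : GetBitsPost Blk len mem1 mem2 f (32 - 24) z2) :
    GetBitsPost Blk len mem mem2 f 32 ((z1 + z2 * 2 ^ 24) % 2 ^ 32) :=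
  GetBitsPost.combine c1 c2 (by omega) hvb

/-! ### No axiom beyond Lean's three -/

#print axioms Bits.transfer
#print axioms Bits.frame
#print axioms Bits.reblk
#print axioms Bits.site_segment_next
#print axioms Bits.store_stream
#print axioms Bits.mu_store_next_seg
#print axioms mu_transfer
#print axioms muOf_after_capture
#print axioms GetBitsPost.combine
#print axioms mask_and_lt
#print axioms mu_wf

end Vorbis.BitsTest
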